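-- pv_equiv track=rewrite | github.com/tippitytapp/python_guided | unit1/week3/wednesday/guided.py | find_smallest_missing
-- ===== SOURCE A (Python) =====
-- def find_smallest_missing(arr):
-- # '''    edge case: deal witht e edge case where 0 is missing
-- #     check to make sure that 0 is at tge front of the array
-- #     edge case: if no elements are missing, return the element right
-- #     after the last element
--
-- #     loop through the arr
-- #     check adjacent elements
-- #     # make sure that the adjacent element == currnent + 1
-- #     current = arr[0]
-- # '''
--
--     ### SOLUTION # 1
--     if len(arr) == 0:
--         return
--     if arr[0] != 0:
--         return 0
--     for i in range(len(arr) - 1):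
--         if arr[i+1] != arr[i]+1:
--             return arr[i] + 1
--     return arr[-1] + 1
-- ===== SOURCE B (Python) =====
-- def find_smallest_missing(arr):
--     if not arr:
--         return None
--
--     def mism(lo, hi):
--         # first index i in [lo, hi) with arr[i] != i, or hi if none
--         if hi <= lo + 1:
--             if lo < hi and arr[lo] != lo:
--                 return lo
--             return hi
--         mid = (lo + hi) // 2
--         left = mism(lo, mid)
--         if left < mid:
--             return left
--         return mism(mid, hi)
--
--     return mism(0, len(arr))
-- ===== Notes on version B (the rewrite author's own statement) =====
-- stated objective: alternative
-- what changed: Replaces A's linear adjacent-element scan (arr[i+1] != arr[i]+1 with early return of arr[i]+1) by a divide-and-conquer search that recursively locates the first index m with arr[m] != m, pruning the right half when the left half already contains a mismatch.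
import Mathlib
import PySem

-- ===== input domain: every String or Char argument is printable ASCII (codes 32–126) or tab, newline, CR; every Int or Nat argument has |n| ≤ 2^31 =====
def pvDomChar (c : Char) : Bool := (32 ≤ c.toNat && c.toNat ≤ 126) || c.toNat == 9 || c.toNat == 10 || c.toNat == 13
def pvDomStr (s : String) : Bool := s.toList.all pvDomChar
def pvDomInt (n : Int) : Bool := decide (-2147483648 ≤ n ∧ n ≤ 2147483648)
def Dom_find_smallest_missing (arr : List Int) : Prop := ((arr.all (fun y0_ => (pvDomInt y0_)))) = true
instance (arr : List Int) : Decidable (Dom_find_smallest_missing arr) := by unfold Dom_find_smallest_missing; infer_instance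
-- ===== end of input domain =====

-- B replaces A's linear adjacent-element scan by a divide-and-conquer search for the
-- first index m with arr[m] != m (alternative decomposition; same O(n) worst-case cost).


-- ===== PORT A =====
-- A's for-loop over range(len(arr)-1) compares each element with its successor,
-- carrying the current element; falling off the loop returns arr[-1]+1.
def pvALoop (prev : Int) : List Int → Int
  | [] => prev + 1
  | x :: xs => if x ≠ prev + 1 then prev + 1 else pvALoop x xs

def find_smallest_missing (arr : List Int) : Option Int :=
  match arr with
  | [] => none
  | a :: rest => if a ≠ 0 then some 0 else some (pvALoop a rest)

-- ===== PORT B =====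
-- B's recursive helper mism(lo, hi): first index i in [lo, hi) with arr[i] != i, or hi.
-- lo, hi are nonnegative Python ints with 0 ≤ lo ≤ hi ≤ len(arr), so Nat with Nat
-- division is exact for Python's (lo + hi) // 2; arr[lo] is in range, so getD is exact.
-- fuel is only a structural totalization guard: any fuel ≥ hi - lo gives mism's value
-- (each recursive call shrinks hi - lo by at least 1), and it is called with fuel = len(arr).
def pvMism (arr : List Int) : Nat → Nat → Nat → Nat
  | 0, _lo, hi => hi
  | fuel + 1, lo, hi =>
    if hi ≤ lo + 1 then
      if lo < hi ∧ arr.getD lo 0 ≠ (lo : Int) then lo else hi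
    else
      let mid := (lo + hi) / 2
      let left := pvMism arr fuel lo mid
      if left < mid then left else pvMism arr fuel mid hi

def find_smallest_missing_alt (arr : List Int) : Option Int :=
  match arr with
  | [] => none
  | _ :: _ => some ((pvMism arr arr.length 0 arr.length : Nat) : Int)

-- ===== PRECONDITION & SPEC =====
def Spec_find_smallest_missing (arr : List Int) (out : Option Int) : Prop := out = find_smallest_missing_alt arr
instance (arr : List Int) (out : Option Int) : Decidable (Spec_find_smallest_missing arr out) := by unfold Spec_find_smallest_missing; infer_instance

-- ===== CLAIM (what is proved, stated in full; the proofs are below) =====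
def Claim_equal_find_smallest_missing : Prop := ∀ (arr : List Int), Dom_find_smallest_missing arr → Spec_find_smallest_missing arr (find_smallest_missing arr)

-- ===== LEMMAS AND PROOFS =====

-- Linear characterisation of the first mismatch index, used only in the proof.
def pvFirst (arr : List Int) (lo hi : Nat) : Nat :=
  if lo < hi then
    if arr.getD lo 0 = (lo : Int) then pvFirst arr (lo + 1) hi else lo
  else hi
termination_by hi - lo
decreasing_by omega

theorem pvFirst_stop (arr : List Int) (lo hi : Nat) (h : ¬ lo < hi) :
    pvFirst arr lo hi = hi := by
  rw [pvFirst]; simp [h]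

theorem pvFirst_split (arr : List Int) (mid : Nat) :
    ∀ lo hi : Nat, lo ≤ mid → mid ≤ hi →
    pvFirst arr lo hi =
      (if pvFirst arr lo mid < mid then pvFirst arr lo mid else pvFirst arr mid hi) := by
  intro lo hi h1 h2
  induction hk : mid - lo generalizing lo with
  | zero =>
    have hlm : lo = mid := by omega
    subst hlm
    rw [pvFirst_stop arr lo lo (by omega)]
    simp
  | succ k ih =>
    have hlm : lo < mid := by omega
    have hlo : lo < hi := by omega
    rw [pvFirst.eq_def arr lo hi, pvFirst.eq_def arr lo mid]
    simp only [if_pos hlo, if_pos hlm]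
    by_cases hm : arr.getD lo 0 = (lo : Int)
    · simp only [if_pos hm]
      exact ih (lo + 1) (by omega) (by omega)
    · simp only [if_neg hm]
      simp [hlm]

theorem pvMism_eq_pvFirst (arr : List Int) :
    ∀ n lo hi : Nat, hi - lo ≤ n → pvMism arr n lo hi = pvFirst arr lo hi := by
  intro n
  induction n with
  | zero =>
    intro lo hi h
    have h1 : hi ≤ lo := by omega
    rw [pvMism, pvFirst_stop arr lo hi (by omega)]
  | succ n ih =>
    intro lo hi h
    rw [pvMism]
    by_cases hbase : hi ≤ lo + 1
    · simp only [if_pos hbase]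
      by_cases hlt : lo < hi
      · have hhi : hi = lo + 1 := by omega
        subst hhi
        rw [pvFirst.eq_def]
        simp only [if_pos hlt]
        by_cases hm : arr.getD lo 0 = (lo : Int)
        · have hm' : arr[lo]?.getD 0 = (lo : Int) := by
            simpa [List.getD_eq_getElem?_getD] using hm
          rw [if_pos hm, pvFirst_stop arr (lo + 1) (lo + 1) (by omega)]
          simp [hm']
        · have hm' : ¬ arr[lo]?.getD 0 = (lo : Int) := by
            simpa [List.getD_eq_getElem?_getD] using hm
          rw [if_neg hm]
          simp [hm', hlt]
      · rw [pvFirst_stop arr lo hi hlt]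
        simp [hlt]
    · simp only [if_neg hbase]
      have h1 : lo + 2 ≤ hi := by omega
      have hmid1 : lo < (lo + hi) / 2 := by omega
      have hmid2 : (lo + hi) / 2 < hi := by omega
      rw [ih lo ((lo + hi) / 2) (by omega), ih ((lo + hi) / 2) hi (by omega)]
      exact (pvFirst_split arr ((lo + hi) / 2) lo hi (by omega) (by omega)).symm

-- pvFirst on the full list equals a structural scan of the dropped suffix.
def pvLin (k : Nat) : List Int → Nat
  | [] => k
  | v :: vs => if v = (k : Int) then pvLin (k + 1) vs else k

theorem pvFirst_eq_pvLin (arr : List Int) :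
    ∀ n k : Nat, arr.length - k ≤ n → k ≤ arr.length →
    pvFirst arr k arr.length = pvLin k (arr.drop k) := by
  intro n
  induction n with
  | zero =>
    intro k h hk
    have hkl : k = arr.length := by omega
    subst hkl
    rw [pvFirst_stop arr arr.length arr.length (by omega)]
    simp [pvLin]
  | succ n ih =>
    intro k h hk
    by_cases hlt : k < arr.length
    · have hdrop : arr.drop k = arr[k] :: arr.drop (k + 1) := List.drop_eq_getElem_cons hlt
      have hget : arr.getD k 0 = arr[k] := by
        simp [List.getD_eq_getElem?_getD, List.getElem?_eq_getElem hlt]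
      rw [pvFirst, hdrop]
      simp only [if_pos hlt, hget, pvLin]
      by_cases hm : arr[k] = (k : Int)
      · simp only [if_pos hm]
        exact ih (k + 1) (by omega) (by omega)
      · simp [hm]
    · have hkl : k = arr.length := by omega
      subst hkl
      rw [pvFirst_stop arr arr.length arr.length (by omega)]
      simp [pvLin]

-- A's carried-value scan computes the same index (cast to Int) as the linear scan.
theorem pvALoop_eq_pvLin (xs : List Int) :
    ∀ k : Nat, pvALoop (k : Int) xs = ((pvLin (k + 1) xs : Nat) : Int) := by
  induction xs with
  | nil => intro k; simp [pvALoop, pvLin]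
  | cons x xs ih =>
    intro k
    simp only [pvALoop, pvLin]
    by_cases hm : x = (k : Int) + 1
    · have hx : x = ((k + 1 : Nat) : Int) := by push_cast; omega
      rw [if_neg (by simp [hm]), if_pos hx, hm]
      have := ih (k + 1)
      push_cast at this ⊢
      simpa using this
    · rw [if_pos hm, if_neg (by push_cast; omega)]
      push_cast; ring

-- ===== VERDICT (by name: the statement is the Claim_ definition above) =====
theorem find_smallest_missing_spec : Claim_equal_find_smallest_missing := by
  intro arr _
  unfold Spec_find_smallest_missing find_smallest_missing find_smallest_missing_alt
  match arr with
  | [] => rfl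
  | a :: rest =>
    have hB : pvMism (a :: rest) (a :: rest).length 0 (a :: rest).length = pvLin 0 (a :: rest) := by
      rw [pvMism_eq_pvFirst (a :: rest) (a :: rest).length 0 (a :: rest).length (by omega)]
      have := pvFirst_eq_pvLin (a :: rest) (a :: rest).length 0 (by omega) (by omega)
      simpa using this
    simp only [List.length_cons] at hB
    by_cases h : a = 0
    · subst h
      have hA := pvALoop_eq_pvLin rest 0
      simp only [Nat.cast_zero, zero_add] at hA
      have hL : pvLin 0 (0 :: rest) = pvLin 1 rest := by simp [pvLin]
      simp [hB, hL, hA]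
    · have hL : pvLin 0 (a :: rest) = 0 := by simp [pvLin, h]
      simp [h, hB, hL]
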